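-- pv_equiv track=rewrite | github.com/L0thlorien/mabe-mouse-behavior-detection | src/data_loader.py | parse_behaviors_labeled
-- ===== SOURCE A (Python) =====
-- from typing import Tuple, Dict, List, Optional
--
-- def parse_behaviors_labeled(behaviors_labeled: List[str]) -> Dict[str, List[Tuple]]:
--     parsed = {'single': [], 'pair': []}
--
--     for behavior_str in behaviors_labeled:
--         parts = behavior_str.split(',')
--         if len(parts) == 3:
--             agent, target, action = parts
--             behavior_type = 'single' if target == 'self' else 'pair'
--
--             key = (agent, target)
--             existing = [item for item in parsed[behavior_type] if item[0] == key]
--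
--             if existing:
--                 existing[0][1].append(action)
--             else:
--                 parsed[behavior_type].append((key, [action]))
--
--     return parsed
-- ===== SOURCE B (Python) =====
-- def parse_behaviors_labeled(behaviors_labeled):
--     # Staged passes: parse every line once into (agent, target, action) triples,
--     # partition by behavior type, then build each group key-by-key
--     # (keys in first-occurrence order, actions gathered by one filter per key).
--     records = []
--     for s in behaviors_labeled:
--         parts = s.split(',')
--         if len(parts) == 3:
--             records.append((parts[0], parts[1], parts[2]))
--
--     def group(recs):
--         keys = []
--         for a, t, _ in recs:
--             if (a, t) not in keys:
--                 keys.append((a, t))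
--         return [(k, [ac for (a, t, ac) in recs if (a, t) == k]) for k in keys]
--
--     singles = [r for r in records if r[1] == 'self']
--     pairs = [r for r in records if r[1] != 'self']
--     return {'single': group(singles), 'pair': group(pairs)}
-- ===== Notes on version B (the rewrite author's own statement) =====
-- stated objective: alternative
-- what changed: B builds the result key-major in staged passes (parse all lines into triples, partition by behavior type, list the distinct keys in first-occurrence order, then gather each key's actions with one filter per key) instead of A's line-major single pass that rescans and mutates the growing output list per line.
import Mathlib
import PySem

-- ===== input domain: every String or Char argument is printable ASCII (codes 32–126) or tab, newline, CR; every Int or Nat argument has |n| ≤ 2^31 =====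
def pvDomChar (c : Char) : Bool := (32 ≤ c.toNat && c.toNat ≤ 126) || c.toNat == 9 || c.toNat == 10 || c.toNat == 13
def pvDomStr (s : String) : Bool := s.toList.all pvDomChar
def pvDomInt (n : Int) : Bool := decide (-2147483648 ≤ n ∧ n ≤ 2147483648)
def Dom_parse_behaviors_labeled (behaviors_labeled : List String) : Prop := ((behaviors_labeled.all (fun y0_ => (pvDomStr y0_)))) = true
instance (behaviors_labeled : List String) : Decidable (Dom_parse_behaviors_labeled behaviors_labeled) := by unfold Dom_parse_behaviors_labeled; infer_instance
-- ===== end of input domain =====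

-- B builds the result key-major in staged passes (parse into triples, partition by type,
-- distinct keys in first-occurrence order, one filter per key) instead of A's line-major
-- pass mutating the growing output (objective: alternative).

-- ===== PORT A =====
-- Python's `existing[0][1].append(action)` mutates the list aliased inside parsed[behavior_type];
-- ported exactly as an in-place update of the FIRST entry whose key matches.
def pvUpdateFirst (key : String × String) (action : String) :
    List ((String × String) × List String) → List ((String × String) × List String)
  | [] => []
  | item :: rest =>
    if item.1 == key then (item.1, item.2 ++ [action]) :: rest
    else item :: pvUpdateFirst key action rest

-- the dict with the two fixed keys 'single'/'pair' is ported as a pair of lists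
def pvA_step
    (st : List ((String × String) × List String) × List ((String × String) × List String))
    (behavior_str : String) :
    List ((String × String) × List String) × List ((String × String) × List String) :=
  -- behavior_str.split(','): the separator is nonempty, so split? always returns some (getD [] is exact)
  match (PySem.Str.split? behavior_str ",").getD [] with
  | [agent, target, action] =>
    let key := (agent, target)
    if target == "self" then
      let existing := st.1.filter (fun item => item.1 == key)
      if !existing.isEmpty then (pvUpdateFirst key action st.1, st.2)
      else (st.1 ++ [(key, [action])], st.2)
    else
      let existing := st.2.filter (fun item => item.1 == key)
      if !existing.isEmpty then (st.1, pvUpdateFirst key action st.2)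
      else (st.1, st.2 ++ [(key, [action])])
  | _ => st

def parse_behaviors_labeled (behaviors_labeled : List String) :
    List (String × List ((String × String) × List String)) :=
  let st := behaviors_labeled.foldl pvA_step ([], [])
  [("single", st.1), ("pair", st.2)]

-- ===== PORT B =====
-- the parsing loop: keep only the lines splitting into exactly three parts, as triples
def pvParseRecords : List String → List (String × String × String)
  | [] => []
  | s :: rest =>
    match (PySem.Str.split? s ",").getD [] with
    | [a, t, ac] => (a, t, ac) :: pvParseRecords rest
    | _ => pvParseRecords rest

-- the `keys` loop of group(): `if (a, t) not in keys: keys.append((a, t))`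
def pvKeyStep (ks : List (String × String)) (r : String × String × String) :
    List (String × String) :=
  if ks.contains (r.1, r.2.1) then ks else ks ++ [(r.1, r.2.1)]

def pvKeys (recs : List (String × String × String)) : List (String × String) :=
  recs.foldl pvKeyStep []

-- group(): keys in first-occurrence order, actions gathered by one filter per key
def pvGroup (recs : List (String × String × String)) :
    List ((String × String) × List String) :=
  (pvKeys recs).map (fun k => (k, (recs.filter (fun r => (r.1, r.2.1) == k)).map (·.2.2)))

def parse_behaviors_labeled_alt (behaviors_labeled : List String) :
    List (String × List ((String × String) × List String)) :=
  let records := pvParseRecords behaviors_labeled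
  let singles := records.filter (fun r => r.2.1 == "self")
  let pairs := records.filter (fun r => !(r.2.1 == "self"))
  [("single", pvGroup singles), ("pair", pvGroup pairs)]

-- ===== PRECONDITION & SPEC =====
def Spec_parse_behaviors_labeled (behaviors_labeled : List String) (out : List (String × List ((String × String) × List String))) : Prop := out = parse_behaviors_labeled_alt behaviors_labeled
instance (behaviors_labeled : List String) (out : List (String × List ((String × String) × List String))) : Decidable (Spec_parse_behaviors_labeled behaviors_labeled out) := by unfold Spec_parse_behaviors_labeled; infer_instance

-- ===== CLAIM (what is proved, stated in full; the proofs are below) =====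
def Claim_equal_parse_behaviors_labeled : Prop := ∀ (behaviors_labeled : List String), Dom_parse_behaviors_labeled behaviors_labeled → Spec_parse_behaviors_labeled behaviors_labeled (parse_behaviors_labeled behaviors_labeled)

-- ===== LEMMAS AND PROOFS =====

-- A's per-line step restricted to one behavior type's list
def pvStep1 (acc : List ((String × String) × List String)) (r : String × String × String) :
    List ((String × String) × List String) :=
  let key := (r.1, r.2.1)
  if !(acc.filter (fun item => item.1 == key)).isEmpty then pvUpdateFirst key r.2.2 acc
  else acc ++ [(key, [r.2.2])]

-- A's fold over lines = two independent folds over the type-partitioned parsed records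
lemma pvA_fold_split (l : List String)
    (st : List ((String × String) × List String) × List ((String × String) × List String)) :
    l.foldl pvA_step st =
      (((pvParseRecords l).filter (fun r => r.2.1 == "self")).foldl pvStep1 st.1,
       ((pvParseRecords l).filter (fun r => !(r.2.1 == "self"))).foldl pvStep1 st.2) := by
  induction l generalizing st with
  | nil => simp [pvParseRecords]
  | cons s rest ih =>
    rw [List.foldl_cons]
    rcases hp : (PySem.Str.split? s ",").getD [] with _ | ⟨ag, _ | ⟨tg, _ | ⟨ac, _ | more⟩⟩⟩
    · rw [show pvA_step st s = st by simp [pvA_step, hp]]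
      simp only [pvParseRecords, hp]; exact ih st
    · rw [show pvA_step st s = st by simp [pvA_step, hp]]
      simp only [pvParseRecords, hp]; exact ih st
    · rw [show pvA_step st s = st by simp [pvA_step, hp]]
      simp only [pvParseRecords, hp]; exact ih st
    · simp only [pvParseRecords, hp]
      by_cases ht : tg == "self"
      · rw [show pvA_step st s = (pvStep1 st.1 (ag, tg, ac), st.2) by
          by_cases he : (!(st.1.filter (fun item => item.1 == (ag, tg))).isEmpty) = true <;>
            simp [pvA_step, hp, ht, pvStep1, he], ih]
        simp [ht]
      · rw [show pvA_step st s = (st.1, pvStep1 st.2 (ag, tg, ac)) by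
          by_cases he : (!(st.2.filter (fun item => item.1 == (ag, tg))).isEmpty) = true <;>
            simp [pvA_step, hp, ht, pvStep1, he], ih]
        simp [ht]
    · rw [show pvA_step st s = st by simp [pvA_step, hp]]
      simp only [pvParseRecords, hp]; exact ih st

lemma pv_mem_keys_foldl (recs : List (String × String × String))
    (ks : List (String × String)) (k : String × String) :
    k ∈ recs.foldl pvKeyStep ks ↔ k ∈ ks ∨ k ∈ recs.map (fun r => (r.1, r.2.1)) := by
  induction recs generalizing ks with
  | nil => simp
  | cons r rest ih =>
    rw [List.foldl_cons]
    by_cases hc : ks.contains (r.1, r.2.1)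
    · have hm : ((r.1, r.2.1) : String × String) ∈ ks := by simpa using hc
      rw [pvKeyStep, if_pos hc, ih]
      have : k = (r.1, r.2.1) → k ∈ ks := fun h => h ▸ hm
      simp only [List.map_cons, List.mem_cons]
      tauto
    · rw [pvKeyStep, if_neg hc, ih]
      simp only [List.mem_append, List.map_cons, List.mem_cons]
      tauto

lemma pv_nodup_keys_foldl (recs : List (String × String × String))
    (ks : List (String × String)) (h : ks.Nodup) :
    (recs.foldl pvKeyStep ks).Nodup := by
  induction recs generalizing ks with
  | nil => exact h
  | cons r rest ih =>
    rw [List.foldl_cons, pvKeyStep]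
    by_cases hc : ks.contains (r.1, r.2.1)
    · rw [if_pos hc]; exact ih _ h
    · rw [if_neg hc]
      refine ih _ ?_
      have hnm : ((r.1, r.2.1) : String × String) ∉ ks := by simpa using hc
      refine List.nodup_append.mpr ⟨h, List.nodup_singleton _, ?_⟩
      intro a ha b hb heq
      subst heq
      rw [List.mem_singleton] at hb
      exact hnm (hb ▸ ha)

lemma pv_group_fsts (recs : List (String × String × String)) :
    (pvGroup recs).map (·.1) = pvKeys recs := by
  simp [pvGroup, List.map_map, Function.comp_def]

lemma pv_updateFirst_eq_map (k : String × String) (ac : String)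
    (xs : List ((String × String) × List String)) (h : (xs.map (·.1)).Nodup) :
    pvUpdateFirst k ac xs = xs.map (fun it => if it.1 == k then (it.1, it.2 ++ [ac]) else it) := by
  induction xs with
  | nil => rfl
  | cons x rest ih =>
    simp only [List.map_cons, List.nodup_cons] at h
    by_cases hx : x.1 = k
    · have hrest : rest.map (fun it => if it.1 == k then (it.1, it.2 ++ [ac]) else it) = rest := by
        have hall : ∀ it ∈ rest, (if it.1 == k then (it.1, it.2 ++ [ac]) else it) = it := by
          intro it hit
          have : it.1 ≠ k := fun he => h.1 (hx ▸ he ▸ List.mem_map_of_mem hit)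
          simp [this]
        calc rest.map _ = rest.map id := List.map_congr_left hall
          _ = rest := List.map_id rest
      simp only [pvUpdateFirst, List.map_cons]
      rw [hrest]
      simp [hx]
    · simp [pvUpdateFirst, hx, ih h.2]

-- one A-step on B's grouped view of the processed records = B's grouped view after the record
lemma pv_step1_group (p : List (String × String × String)) (r : String × String × String) :
    pvStep1 (pvGroup p) r = pvGroup (p ++ [r]) := by
  have hkeys : pvKeys (p ++ [r]) = pvKeyStep (pvKeys p) r := by
    simp [pvKeys, List.foldl_append]
  have hnd : (pvKeys p).Nodup := pv_nodup_keys_foldl p [] List.nodup_nil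
  have hmem : ∀ k, k ∈ pvKeys p ↔ k ∈ p.map (fun r' => (r'.1, r'.2.1)) := by
    intro k; simpa using pv_mem_keys_foldl p [] k
  by_cases hk : ((r.1, r.2.1) : String × String) ∈ pvKeys p
  · -- key already present: A updates the (unique) matching entry in place
    have hcon : (pvKeys p).contains (r.1, r.2.1) = true := by simpa using hk
    have hne : ((pvGroup p).filter (fun it => it.1 == (r.1, r.2.1))).isEmpty = false := by
      rw [List.isEmpty_eq_false_iff]
      intro hnil
      have hall := List.filter_eq_nil_iff.mp hnil
      have hm : (((r.1, r.2.1) : String × String),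
          (p.filter (fun r' => (r'.1, r'.2.1) == (r.1, r.2.1))).map (·.2.2)) ∈ pvGroup p :=
        List.mem_map_of_mem (f := fun k => (k, (p.filter (fun r' => (r'.1, r'.2.1) == k)).map (·.2.2))) hk
      have := hall _ hm
      simp at this
    have hup := pv_updateFirst_eq_map (r.1, r.2.1) r.2.2 (pvGroup p)
      (by rw [pv_group_fsts]; exact hnd)
    rw [pvStep1, hne]
    simp only [Bool.not_false, if_pos]
    rw [hup]
    simp only [pvGroup]
    rw [hkeys, pvKeyStep, if_pos hcon, List.map_map]
    refine List.map_congr_left ?_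
    intro k hkm
    by_cases hkr : k = (r.1, r.2.1)
    · simp [hkr, List.filter_append]
    · simp [hkr, Ne.symm hkr, List.filter_append]
  · -- new key: A appends a fresh entry at the end
    have hcon : (pvKeys p).contains (r.1, r.2.1) = false := by simpa using hk
    have hempty : ((pvGroup p).filter (fun it => it.1 == (r.1, r.2.1))).isEmpty = true := by
      rw [List.isEmpty_iff, List.filter_eq_nil_iff]
      intro it hit
      have : it.1 ∈ pvKeys p := by
        rw [← pv_group_fsts]; exact List.mem_map_of_mem hit
      simp only [beq_iff_eq]
      exact fun he => hk (he ▸ this)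
    have hnorec : p.filter (fun r' => (r'.1, r'.2.1) == (r.1, r.2.1)) = [] := by
      rw [List.filter_eq_nil_iff]
      intro r' hr'
      simp only [beq_iff_eq]
      exact fun he => hk ((hmem _).mpr (he ▸ List.mem_map_of_mem hr'))
    rw [pvStep1, hempty]
    simp only [Bool.not_true, if_neg, Bool.false_eq_true, not_false_eq_true]
    simp only [pvGroup]
    rw [hkeys, pvKeyStep, if_neg (by simpa using hk), List.map_append]
    congr 1
    · refine List.map_congr_left ?_
      intro k hkm
      have hkr : k ≠ (r.1, r.2.1) := fun he => hk (he ▸ hkm)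
      simp [List.filter_append, Ne.symm hkr]
    · simp [List.filter_append, hnorec]

lemma pv_fold_group (recs p : List (String × String × String)) :
    recs.foldl pvStep1 (pvGroup p) = pvGroup (p ++ recs) := by
  induction recs generalizing p with
  | nil => simp
  | cons r rest ih =>
    rw [List.foldl_cons, pv_step1_group, ih]
    simp

lemma pv_fold_group_nil (recs : List (String × String × String)) :
    recs.foldl pvStep1 [] = pvGroup recs := by
  have h0 : pvGroup [] = [] := by simp [pvGroup, pvKeys]
  have := pv_fold_group recs []
  rw [h0] at this
  simpa using this

-- ===== VERDICT (by name: the statement is the Claim_ definition above) =====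
theorem parse_behaviors_labeled_spec : Claim_equal_parse_behaviors_labeled := by
  intro l _
  unfold Spec_parse_behaviors_labeled parse_behaviors_labeled parse_behaviors_labeled_alt
  rw [pvA_fold_split l ([], [])]
  simp only [pv_fold_group_nil]
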